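-- pv_equiv track=rewrite | github.com/garrywilliams/site-analyser | site_analyser/agents/link_functionality_agent.py | _prioritize_links
-- ===== SOURCE A (Python) =====
-- from typing import List, Dict, Optional
--
-- def _prioritize_links(links: List[str]) -> List[str]:
--     """Prioritize links by importance for testing."""
--     priority_keywords = [
--         'privacy', 'terms', 'conditions', 'contact', 'about',
--         'service', 'product', 'pricing', 'register', 'login',
--         'download', 'help', 'support', 'legal'
--     ]
--
--     def get_priority_score(link):
--         link_lower = link.lower()
--         score = 0
--         for keyword in priority_keywords:
--             if keyword in link_lower:
--                 score += 1
--         return score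
--
--     # Sort by priority score (descending) then by URL length (ascending)
--     return sorted(links, key=lambda x: (-get_priority_score(x), len(x)))
-- ===== SOURCE B (Python) =====
-- from typing import List
--
-- def _prioritize_links(links: List[str]) -> List[str]:
--     """Prioritize links by importance for testing (bucket by score, then length-sort each bucket)."""
--     priority_keywords = [
--         'privacy', 'terms', 'conditions', 'contact', 'about',
--         'service', 'product', 'pricing', 'register', 'login',
--         'download', 'help', 'support', 'legal'
--     ]
--     n = len(priority_keywords)
--
--     def score(link):
--         ll = link.lower()
--         return sum(1 for kw in priority_keywords if kw in ll)
--
--     out = []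
--     for s in range(n, -1, -1):
--         bucket = [link for link in links if score(link) == s]
--         out.extend(sorted(bucket, key=len))
--     return out
-- ===== Notes on version B (the rewrite author's own statement) =====
-- stated objective: alternative
-- what changed: Replaces the single tuple-key sort with bucketing links by their keyword-match score (14..0) and emitting each bucket stable-sorted by length.
import Mathlib
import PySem

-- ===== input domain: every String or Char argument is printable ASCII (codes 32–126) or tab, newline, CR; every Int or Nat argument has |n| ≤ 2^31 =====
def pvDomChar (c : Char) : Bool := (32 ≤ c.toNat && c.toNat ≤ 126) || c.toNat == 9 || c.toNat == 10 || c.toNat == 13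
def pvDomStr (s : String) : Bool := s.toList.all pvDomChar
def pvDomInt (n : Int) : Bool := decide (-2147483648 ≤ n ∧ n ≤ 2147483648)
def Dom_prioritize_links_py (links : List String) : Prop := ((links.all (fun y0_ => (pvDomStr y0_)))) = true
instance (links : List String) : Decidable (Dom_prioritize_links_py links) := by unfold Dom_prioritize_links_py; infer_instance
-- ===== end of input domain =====

-- B buckets the links by keyword score and length-sorts each bucket instead of one tuple-key sort; objective: alternative decomposition.

-- ===== PORT A =====
def pvKeywords : List String :=
  ["privacy", "terms", "conditions", "contact", "about",
   "service", "product", "pricing", "register", "login",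
   "download", "help", "support", "legal"]

-- A's get_priority_score: an explicit accumulator loop over the keywords
def getPriorityScore (link : String) : Int :=
  let link_lower := PySem.Str.lower link
  pvKeywords.foldl (fun score keyword =>
    if PySem.Str.isIn keyword link_lower then score + 1 else score) 0

def prioritize_links_py (links : List String) : List String :=
  PySem.List.sorted2 links (fun x => -(getPriorityScore x)) (fun x => PySem.Str.len x)

-- ===== PORT B =====
-- B's score: sum(1 for kw in keywords if kw in ll), i.e. a count
def pvScore (link : String) : Int :=
  let ll := PySem.Str.lower link
  (pvKeywords.countP (fun kw => PySem.Str.isIn kw ll) : Int)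

def prioritize_links_py_alt (links : List String) : List String :=
  (PySem.List.pyRange (pvKeywords.length : Int) (-1) (-1)).flatMap (fun s =>
    PySem.List.sorted (links.filter (fun link => pvScore link == s))
      (fun link => PySem.Str.len link))

-- ===== PRECONDITION & SPEC =====
def Spec_prioritize_links_py (links : List String) (out : List String) : Prop := out = prioritize_links_py_alt links
instance (links : List String) (out : List String) : Decidable (Spec_prioritize_links_py links out) := by unfold Spec_prioritize_links_py; infer_instance

-- ===== CLAIM (what is proved, stated in full; the proofs are below) =====
def Claim_equal_prioritize_links_py : Prop := ∀ (links : List String), Dom_prioritize_links_py links → Spec_prioritize_links_py links (prioritize_links_py links)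

-- ===== LEMMAS AND PROOFS =====

-- the comparison sorted2 uses in port A, written with B's score
def pvBefore (a b : String) : Bool :=
  decide (-(pvScore a) < -(pvScore b)) ||
    (!decide (-(pvScore b) < -(pvScore a)) && decide (PySem.Str.len a < PySem.Str.len b))

def pvLenBefore (a b : String) : Bool := decide (PySem.Str.len a < PySem.Str.len b)

lemma score_eq (link : String) : getPriorityScore link = pvScore link := by
  simp [getPriorityScore, pvScore, PySem.List.foldl_count_if]

lemma portA_eq_foldl (links : List String) :
    prioritize_links_py links =
      links.foldl (fun acc x => PySem.List.insertBy pvBefore x acc) [] := by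
  have h : getPriorityScore = pvScore := funext score_eq
  unfold prioritize_links_py PySem.List.sorted2
  rw [h]
  rfl

lemma insertBy_append_left {α : Type} (before : α → α → Bool) (x : α) (l1 l2 : List α)
    (h : ∀ y ∈ l1, before x y = false) :
    PySem.List.insertBy before x (l1 ++ l2) = l1 ++ PySem.List.insertBy before x l2 := by
  induction l1 with
  | nil => simp
  | cons y t ih =>
    simp only [List.cons_append, PySem.List.insertBy, h y (by simp)]
    simp only [Bool.false_eq_true, if_false, List.cons.injEq, true_and]
    exact ih (fun z hz => h z (by simp [hz]))

lemma insertBy_append_right {α : Type} (before : α → α → Bool) (x : α) (l1 l2 : List α)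
    (h : ∀ y ∈ l2, before x y = true) :
    PySem.List.insertBy before x (l1 ++ l2) = PySem.List.insertBy before x l1 ++ l2 := by
  induction l1 with
  | nil =>
    cases l2 with
    | nil => simp
    | cons y t => simp [PySem.List.insertBy, h y (by simp)]
  | cons y t ih =>
    by_cases hy : before x y = true
    · simp [PySem.List.insertBy, hy]
    · simp only [Bool.not_eq_true] at hy
      simp [PySem.List.insertBy, hy, ih]

lemma insertBy_congr {α : Type} (b1 b2 : α → α → Bool) (x : α) (ys : List α)
    (h : ∀ y ∈ ys, b1 x y = b2 x y) :
    PySem.List.insertBy b1 x ys = PySem.List.insertBy b2 x ys := by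
  induction ys with
  | nil => rfl
  | cons y t ih =>
    simp only [PySem.List.insertBy, h y (by simp)]
    by_cases hy : b2 x y = true
    · simp [hy]
    · simp only [Bool.not_eq_true] at hy
      simp only [hy, Bool.false_eq_true, if_false, List.cons.injEq, true_and]
      exact ih (fun z hz => h z (by simp [hz]))

lemma pvBefore_of_lt {x y : String} (h : pvScore y < pvScore x) : pvBefore x y = true := by
  have h1 : -(pvScore x) < -(pvScore y) := by omega
  simp [pvBefore, h1]

lemma pvBefore_of_gt {x y : String} (h : pvScore x < pvScore y) : pvBefore x y = false := by
  have h1 : ¬(-(pvScore x) < -(pvScore y)) := by omega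
  have h2 : -(pvScore y) < -(pvScore x) := by omega
  simp [pvBefore, h1, h2]

lemma pvBefore_of_eq {x y : String} (h : pvScore x = pvScore y) :
    pvBefore x y = pvLenBefore x y := by
  have h1 : ¬(-(pvScore x) < -(pvScore y)) := by omega
  have h2 : ¬(-(pvScore y) < -(pvScore x)) := by omega
  simp [pvBefore, pvLenBefore, h1, h2]

-- one insertion step, distributed over the score buckets
lemma step_buckets (x : String) (g : Int → List String) (S : List Int)
    (hdesc : S.Pairwise (fun a b => b < a)) (hmem : pvScore x ∈ S)
    (hg : ∀ s ∈ S, ∀ y ∈ g s, pvScore y = s) :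
    PySem.List.insertBy pvBefore x (S.flatMap g) =
      S.flatMap (fun s => if s = pvScore x then PySem.List.insertBy pvLenBefore x (g s)
                          else g s) := by
  induction S with
  | nil => simp at hmem
  | cons s S' ih =>
    rw [List.pairwise_cons] at hdesc
    by_cases hs : s = pvScore x
    · subst hs
      rw [List.flatMap_cons, List.flatMap_cons]
      have hright : ∀ y ∈ S'.flatMap g, pvBefore x y = true := by
        intro y hy
        rw [List.mem_flatMap] at hy
        obtain ⟨s', hs', hy'⟩ := hy
        have hsy := hg s' (by simp [hs']) y hy'
        exact pvBefore_of_lt (by rw [hsy]; exact hdesc.1 s' hs')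
      rw [insertBy_append_right pvBefore x (g (pvScore x)) (S'.flatMap g) hright]
      rw [insertBy_congr pvBefore pvLenBefore x (g (pvScore x))
        (fun y hy => pvBefore_of_eq (hg (pvScore x) (by simp) y hy).symm)]
      rw [if_pos rfl]
      congr 1
      apply List.flatMap_congr
      intro s' hs'
      have hne : s' ≠ pvScore x := by
        have := hdesc.1 s' hs'; omega
      simp [hne]
    · have hmem' : pvScore x ∈ S' := by
        rcases List.mem_cons.mp hmem with h | h
        · exact absurd h.symm hs
        · exact h
      have hsx : pvScore x < s := hdesc.1 _ hmem'
      rw [List.flatMap_cons, List.flatMap_cons]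
      rw [insertBy_append_left pvBefore x (g s) (S'.flatMap g)
        (fun y hy => pvBefore_of_gt (by rw [hg s (by simp) y hy]; exact hsx))]
      rw [ih hdesc.2 hmem' (fun s' hs' => hg s' (by simp [hs'])), if_neg hs]

lemma sorted_append_singleton (ys : List String) (x : String) :
    PySem.List.sorted (ys ++ [x]) (fun l => PySem.Str.len l) =
      PySem.List.insertBy pvLenBefore x (PySem.List.sorted ys (fun l => PySem.Str.len l)) := by
  rw [PySem.List.sorted_eq_foldl_insertBy, PySem.List.sorted_eq_foldl_insertBy,
    List.foldl_append]
  rfl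

lemma score_mem_range (x : String) :
    pvScore x ∈ PySem.List.pyRange (pvKeywords.length : Int) (-1) (-1) := by
  rw [PySem.List.mem_pyRange_neg_one]
  have h1 : 0 ≤ pvScore x := by simp [pvScore]
  have h2 : pvScore x ≤ (pvKeywords.length : Int) := by
    simp only [pvScore]
    exact_mod_cast List.countP_le_length
  omega

lemma range_desc :
    (PySem.List.pyRange (pvKeywords.length : Int) (-1) (-1)).Pairwise (fun a b => b < a) := by
  decide

lemma main_invariant (links : List String) :
    links.foldl (fun acc x => PySem.List.insertBy pvBefore x acc) [] =
      (PySem.List.pyRange (pvKeywords.length : Int) (-1) (-1)).flatMap (fun s =>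
        PySem.List.sorted (links.filter (fun link => pvScore link == s))
          (fun link => PySem.Str.len link)) := by
  induction links using List.reverseRecOn with
  | nil => simp [PySem.List.sorted]
  | append_singleton xs x ih =>
    rw [List.foldl_append, List.foldl_cons, List.foldl_nil, ih,
      step_buckets x _ _ range_desc (score_mem_range x)
        (by
          intro s _ y hy
          rw [PySem.List.mem_sorted] at hy
          have := List.of_mem_filter hy
          simpa using this)]
    apply List.flatMap_congr
    intro s _
    rw [List.filter_append]
    by_cases hs : s = pvScore x
    · rw [if_pos hs]
      have : List.filter (fun link => pvScore link == s) [x] = [x] := by simp [hs]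
      rw [this, sorted_append_singleton]
    · rw [if_neg hs]
      have hb : (pvScore x == s) = false := by
        simp only [beq_eq_false_iff_ne, ne_eq]
        omega
      have : List.filter (fun link => pvScore link == s) [x] = [] := by
        simp [List.filter, hb]
      rw [this, List.append_nil]

-- ===== VERDICT (by name: the statement is the Claim_ definition above) =====
theorem prioritize_links_py_spec : Claim_equal_prioritize_links_py := by
  intro links _
  unfold Spec_prioritize_links_py prioritize_links_py_alt
  rw [portA_eq_foldl, main_invariant]
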